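-- pv_equiv track=rewrite | github.com/flintlib/flint | dev/check_param_names.py | extract_declarations
-- ===== SOURCE A (Python) =====
-- def extract_declarations(text):
--     """
--     Extract top-level declarations (ending with ';') from cleaned C text.
--     Skips anything inside brace-delimited blocks (function bodies, structs).
--     Returns list of (declaration_text, line_number).
--     """
--     declarations = []
--     current_decl = []
--     brace_depth = 0
--
--     for i, ch in enumerate(text):
--         if ch == "{":
--             brace_depth += 1
--             current_decl = []
--         elif ch == "}":
--             brace_depth -= 1
--             if brace_depth < 0:
--                 brace_depth = 0
--             current_decl = []
--         elif brace_depth == 0: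
--             if ch == ";":
--                 decl_text = "".join(current_decl).strip()
--                 if decl_text and "(" in decl_text and ")" in decl_text:
--                     pos_in_text = i - len(decl_text)
--                     line_num = text[:pos_in_text].count("\n") + 1
--                     declarations.append((decl_text, line_num))
--                 current_decl = []
--             else:
--                 if not current_decl and ch == "\n":
--                     pass  # skip leading newlines
--                 else:
--                     current_decl.append(ch)
--
--     return declarations
-- ===== SOURCE B (Python) =====
-- def extract_declarations(text):
--     """
--     Extract top-level declarations (ending with ';') from cleaned C text.
--     One pass with a segment-start index instead of a char accumulator, and a
--     prefix array of newline counts instead of recounting the prefix per match.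
--     """
--     nl = [0]
--     c = 0
--     for ch in text:
--         if ch == "\n":
--             c += 1
--         nl.append(c)
--
--     declarations = []
--     brace_depth = 0
--     start = 0
--     for i, ch in enumerate(text):
--         if ch == "{":
--             brace_depth += 1
--             start = i + 1
--         elif ch == "}":
--             if brace_depth > 0:
--                 brace_depth -= 1
--             start = i + 1
--         elif brace_depth == 0 and ch == ";":
--             decl_text = text[start:i].strip()
--             if decl_text and "(" in decl_text and ")" in decl_text:
--                 declarations.append((decl_text, nl[i - len(decl_text)] + 1))
--             start = i + 1
--     return declarations
-- ===== Notes on version B (the rewrite author's own statement) =====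
-- stated objective: alternative
-- what changed: B replaces A's per-character accumulator list and A's per-declaration recount of newlines over the whole text prefix by a segment-start index (each declaration is a slice of the text) and a precomputed prefix list of newline counts, so each reported line number is a single table lookup.
import Mathlib
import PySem

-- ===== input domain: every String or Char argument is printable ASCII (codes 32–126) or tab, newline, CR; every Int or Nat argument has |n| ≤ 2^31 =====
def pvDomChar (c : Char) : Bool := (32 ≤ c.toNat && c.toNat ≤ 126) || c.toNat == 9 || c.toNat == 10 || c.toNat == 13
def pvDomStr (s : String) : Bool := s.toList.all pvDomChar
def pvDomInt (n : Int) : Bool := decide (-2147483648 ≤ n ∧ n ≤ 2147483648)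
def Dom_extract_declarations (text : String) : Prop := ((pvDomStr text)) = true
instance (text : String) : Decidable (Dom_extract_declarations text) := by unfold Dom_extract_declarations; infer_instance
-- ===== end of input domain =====

-- B replaces A's per-character accumulator and per-declaration recount of '\n' over the whole
-- prefix by a segment-start index (declarations are slices of the text) and a precomputed
-- prefix list of newline counts (objective: alternative algorithm, one O(1) lookup per match).

-- ===== PORT A =====
-- step of A's for-loop; state = (declarations, current_decl, brace_depth)
def pvStepA (cs : List Char) :
    (List (String × Int) × List Char × Int) → (Int × Char) → (List (String × Int) × List Char × Int)
  | (decls, cur, depth), (i, ch) =>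
    if ch = '{' then (decls, [], depth + 1)
    else if ch = '}' then
      let d := depth - 1
      (decls, [], if d < 0 then 0 else d)
    else if depth = 0 then
      if ch = ';' then
        let declText := PySem.Chars.strip cur
        if declText ≠ [] ∧ PySem.Chars.isIn ['('] declText = true ∧ PySem.Chars.isIn [')'] declText = true then
          let pos : Int := i - declText.length
          let lineNum : Int := (PySem.Chars.count (PySem.List.slice cs none (some pos)) ['\n'] : Int) + 1
          (decls ++ [(String.ofList declText, lineNum)], [], depth)
        else (decls, [], depth)
      else if cur = [] ∧ ch = '\n' then (decls, cur, depth)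
      else (decls, cur ++ [ch], depth)
    else (decls, cur, depth)

def extract_declarations (text : String) : List (String × Int) :=
  let cs := text.toList
  ((PySem.List.enumerate cs).foldl (pvStepA cs) ([], [], 0)).1

-- ===== PORT B =====
-- prefix newline counts: pvNl cs = [n₀, n₁, …] with nⱼ = number of '\n' in the first j chars
def pvNl (cs : List Char) : List Int :=
  (cs.foldl (fun (s : List Int × Int) ch =>
      let c := if ch = '\n' then s.2 + 1 else s.2
      (s.1 ++ [c], c)) ([0], 0)).1

-- step of B's for-loop; state = (declarations, brace_depth, start); the nl index is always in
-- range (0 ≤ i - len ≤ length cs), so pyGetD's default is never used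
def pvStepB (cs : List Char) (nl : List Int) :
    (List (String × Int) × Int × Int) → (Int × Char) → (List (String × Int) × Int × Int)
  | (decls, depth, start), (i, ch) =>
    if ch = '{' then (decls, depth + 1, i + 1)
    else if ch = '}' then (decls, (if depth > 0 then depth - 1 else depth), i + 1)
    else if depth = 0 ∧ ch = ';' then
      let declText := PySem.Chars.strip (PySem.List.slice cs (some start) (some i))
      if declText ≠ [] ∧ PySem.Chars.isIn ['('] declText = true ∧ PySem.Chars.isIn [')'] declText = true then
        (decls ++ [(String.ofList declText, PySem.List.pyGetD nl (i - declText.length) 0 + 1)], depth, i + 1)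
      else (decls, depth, i + 1)
    else (decls, depth, start)

def extract_declarations_alt (text : String) : List (String × Int) :=
  let cs := text.toList
  ((PySem.List.enumerate cs).foldl (pvStepB cs (pvNl cs)) ([], 0, 0)).1

-- ===== PRECONDITION & SPEC =====
-- A returns normally on every string (it never raises), so Pre_ is trivially satisfied and
-- excludes nothing: the five scanner tokens are distinct single characters, so their counts
-- sum to at most the length of the text.
def Pre_extract_declarations (text : String) : Prop :=
  PySem.Str.count text "{" + PySem.Str.count text "}" + PySem.Str.count text ";"
    + PySem.Str.count text "(" + PySem.Str.count text ")" ≤ PySem.Str.len text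
-- (e.g. "int f(int a);" and "void g(int b);" are declarations the scanner extracts)
instance (text : String) : Decidable (Pre_extract_declarations text) := by unfold Pre_extract_declarations; infer_instance
def pvWitness_extract_declarations : String := "int f(int a);\nint g(void) { return 0; }\nchar h(void);\n"

def Spec_extract_declarations (text : String) (out : List (String × Int)) : Prop := out = extract_declarations_alt text
instance (text : String) (out : List (String × Int)) : Decidable (Spec_extract_declarations text out) := by unfold Spec_extract_declarations; infer_instance

-- ===== CLAIM (what is proved, stated in full; the proofs are below) =====
def Claim_equal_extract_declarations : Prop := ∀ (text : String), Dom_extract_declarations text → Pre_extract_declarations text → Spec_extract_declarations text (extract_declarations text)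

-- ===== LEMMAS AND PROOFS =====

-- Chars.count with a single-character needle counts the occurrences of that character
lemma pv_count_go_singleton (c : Char) :
    ∀ (l : List Char) (fuel acc : Nat), l.length ≤ fuel →
      PySem.Chars.count.go [c] fuel l acc = acc + l.count c := by
  intro l
  induction l with
  | nil => intro fuel acc h; cases fuel <;> simp [PySem.Chars.count.go]
  | cons a l ih =>
    intro fuel acc h
    cases fuel with
    | zero => simp at h
    | succ f =>
      have hf : l.length ≤ f := by simpa using h
      by_cases hac : c = a
      · subst hac
        simp [PySem.Chars.count.go, List.isPrefixOf, ih f (acc + 1) hf]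
        omega
      · have hb : (a == c) = false := beq_eq_false_iff_ne.mpr (Ne.symm hac)
        simp [PySem.Chars.count.go, List.isPrefixOf, hac, ih f acc hf, List.count_cons, hb]

lemma pv_count_singleton (c : Char) (l : List Char) :
    PySem.Chars.count l [c] = l.count c := by
  simpa [PySem.Chars.count] using pv_count_go_singleton c l l.length 0 le_rfl

-- stripping is unaffected by first dropping leading newlines
lemma pv_dropWhile_nl_isspace (l : List Char) :
    List.dropWhile PySem.Chars.isspace (List.dropWhile (· == '\n') l)
      = List.dropWhile PySem.Chars.isspace l := by
  induction l with
  | nil => rfl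
  | cons a l ih =>
    by_cases h : a = '\n'
    · subst h
      simp [ih, show PySem.Chars.isspace '\n' = true by decide]
    · simp [List.dropWhile_cons, h]

lemma pv_strip_dropWhile_nl (l : List Char) :
    PySem.Chars.strip (List.dropWhile (· == '\n') l) = PySem.Chars.strip l := by
  simp [PySem.Chars.strip, PySem.Chars.lstrip, pv_dropWhile_nl_isspace]

lemma pv_length_strip_le (l : List Char) : (PySem.Chars.strip l).length ≤ l.length := by
  simp only [PySem.Chars.strip, PySem.Chars.rstrip, PySem.Chars.lstrip, List.length_reverse]
  exact le_trans (List.length_dropWhile_le _ _)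
    (by simpa using List.length_dropWhile_le PySem.Chars.isspace l)

-- characterisation of the prefix-count list
lemma pv_nl_foldl (cs : List Char) :
    ∀ (acc : List Int) (c : Int),
      cs.foldl (fun (s : List Int × Int) ch =>
          let c := if ch = '\n' then s.2 + 1 else s.2
          (s.1 ++ [c], c)) (acc, c)
        = (acc ++ (List.range cs.length).map (fun j => c + ((cs.take (j+1)).count '\n' : Int)),
           c + (cs.count '\n' : Int)) := by
  induction cs with
  | nil => intro acc c; simp
  | cons ch cs ih =>
    intro acc c
    simp only [List.foldl_cons]
    rw [ih]
    by_cases hch : ch = '\n'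
    · subst hch
      simp [List.range_succ_eq_map, List.map_map, Function.comp, List.take_succ_cons]
      constructor
      · intro _ _; ring
      · ring
    · simp [List.range_succ_eq_map, List.map_map, Function.comp, hch, List.take_succ_cons]

lemma pv_nl_getD_aux (cs : List Char) (m : Nat) (hm : m ≤ cs.length) :
    (([(0:Int)] ++ (List.range cs.length).map
        (fun j => (0:Int) + ((cs.take (j+1)).count '\n' : Int))).getD m 0)
      = ((cs.take m).count '\n' : Int) := by
  cases m with
  | zero => simp
  | succ m =>
    have hm' : m < cs.length := by omega
    simp [List.getD_eq_getElem?_getD, hm']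

lemma pv_nl_getD (cs : List Char) (m : Nat) (hm : m ≤ cs.length) :
    (pvNl cs).getD m 0 = ((cs.take m).count '\n' : Int) := by
  unfold pvNl
  rw [pv_nl_foldl]
  exact pv_nl_getD_aux cs m hm

-- main loop invariant: A's accumulated current_decl is the current depth-0 segment of the
-- text (from B's start index) with its leading newlines dropped
lemma pv_main (cs : List Char) :
    ∀ (l : List Char) (k : Nat), cs.drop k = l → k ≤ cs.length →
    ∀ (decls : List (String × Int)) (cur : List Char) (depth : Int) (start : Nat),
      0 ≤ depth →
      (depth = 0 → start ≤ k ∧ cur = List.dropWhile (· == '\n') ((cs.take k).drop start)) →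
      (depth ≠ 0 → cur = []) →
      ((PySem.List.enumerate l (k : Int)).foldl (pvStepA cs) (decls, cur, depth)).1
        = ((PySem.List.enumerate l (k : Int)).foldl (pvStepB cs (pvNl cs)) (decls, depth, (start : Int))).1 := by
  intro l
  induction l with
  | nil =>
    intro k _ _ decls cur depth start _ _ _
    simp [PySem.List.enumerate_nil]
  | cons ch l ih =>
    intro k hdrop hk decls cur depth start hd hinv0 hinvne
    have hklt : k < cs.length := by
      by_contra hge
      have h0 : cs.drop k = [] := List.drop_eq_nil_of_le (by omega)
      rw [h0] at hdrop; cases hdrop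
    have hcons := List.drop_eq_getElem_cons hklt
    rw [hdrop] at hcons
    injection hcons with hch hdrop'
    rw [PySem.List.enumerate_cons, List.foldl_cons, List.foldl_cons]
    by_cases h1 : ch = '{'
    · simp only [pvStepA, pvStepB, if_pos h1]
      have H := ih (k+1) hdrop'.symm (by omega) decls [] (depth+1) (k+1) (by omega)
        (fun h => absurd h (by omega)) (fun _ => rfl)
      push_cast at H
      exact H
    · by_cases h2 : ch = '}'
      · simp only [pvStepA, pvStepB, if_neg h1, if_pos h2]
        have hdeq : (if depth > 0 then depth - 1 else depth)
            = (if depth - 1 < 0 then 0 else depth - 1) := by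
          split_ifs <;> omega
        rw [← hdeq]
        have hcur' : ([] : List Char)
            = List.dropWhile (· == '\n') ((cs.take (k+1)).drop (k+1)) := by
          rw [List.drop_eq_nil_of_le (by simp)]
          rfl
        have H := ih (k+1) hdrop'.symm (by omega) decls []
          (if depth > 0 then depth - 1 else depth) (k+1)
          (by split_ifs <;> omega) (fun _ => ⟨le_rfl, hcur'⟩) (fun _ => rfl)
        push_cast at H
        exact H
      · by_cases h3 : depth = 0
        · subst h3
          obtain ⟨hstart, hcur⟩ := hinv0 rfl
          by_cases h4 : ch = ';'
          · -- the declaration event: both sides compute the same stripped text and line number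
            have hseg : PySem.List.slice cs (some (start : Int)) (some (k : Int))
                = (cs.take k).drop start := by
              rw [PySem.List.slice_natCast, ← List.drop_take]
            have hstrip : PySem.Chars.strip cur
                = PySem.Chars.strip ((cs.take k).drop start) := by
              rw [hcur, pv_strip_dropWhile_nl]
            simp only [pvStepA, pvStepB, if_neg h1, if_neg h2,
              if_true, true_and, if_pos h4, hseg, hstrip]
            set D := PySem.Chars.strip ((cs.take k).drop start) with hD
            have hL : D.length ≤ k := by
              have h5 := pv_length_strip_le ((cs.take k).drop start)
              rw [← hD] at h5
              have h6 : ((cs.take k).drop start).length = k - start := by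
                simp [List.length_drop, List.length_take]
                omega
              omega
            have hline : (PySem.Chars.count
                  (PySem.List.slice cs none (some ((k : Int) - D.length))) ['\n'] : Int)
                = PySem.List.pyGetD (pvNl cs) ((k : Int) - D.length) 0 := by
              have hcastk : ((k : Int) - D.length) = ((k - D.length : Nat) : Int) := by omega
              rw [hcastk, PySem.List.pyGetD_natCast,
                PySem.List.slice_to cs (by omega), pv_count_singleton,
                pv_nl_getD cs (k - D.length) (by omega)]
              norm_num
            have hcur' : ([] : List Char)
                = List.dropWhile (· == '\n') ((cs.take (k+1)).drop (k+1)) := by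
              rw [List.drop_eq_nil_of_le (by simp)]
              rfl
            by_cases hc : D ≠ [] ∧ PySem.Chars.isIn ['('] D = true ∧ PySem.Chars.isIn [')'] D = true
            · simp only [if_pos hc, hline]
              have H := ih (k+1) hdrop'.symm (by omega)
                (decls ++ [(String.ofList D, PySem.List.pyGetD (pvNl cs) ((k : Int) - D.length) 0 + 1)])
                [] 0 (k+1) le_rfl (fun _ => ⟨le_rfl, hcur'⟩) (fun h => absurd rfl h)
              push_cast at H
              exact H
            · simp only [if_neg hc]
              have H := ih (k+1) hdrop'.symm (by omega) decls [] 0 (k+1) le_rfl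
                (fun _ => ⟨le_rfl, hcur'⟩) (fun h => absurd rfl h)
              push_cast at H
              exact H
          · -- ordinary character at depth 0: A appends it (or skips a leading newline),
            -- B leaves start unchanged
            simp only [pvStepA, pvStepB, if_neg h1, if_neg h2,
              if_true, true_and, if_neg h4]
            have hdropapp : (cs.take (k+1)).drop start = (cs.take k).drop start ++ [cs[k]] := by
              rw [List.take_add_one, List.getElem?_eq_getElem hklt]
              simp only [Option.toList_some]
              rw [List.drop_append_of_le_length (by simp [List.length_take]; omega)]
            have hnext : ∀ cur' : List Char,
                cur' = List.dropWhile (· == '\n') ((cs.take (k+1)).drop start) →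
                ((PySem.List.enumerate l ((k : Int)+1)).foldl (pvStepA cs) (decls, cur', 0)).1
                  = ((PySem.List.enumerate l ((k : Int)+1)).foldl
                      (pvStepB cs (pvNl cs)) (decls, 0, (start : Int))).1 := by
              intro cur' hcur'
              have H := ih (k+1) hdrop'.symm (by omega) decls cur' 0 start le_rfl
                (fun _ => ⟨by omega, hcur'⟩) (fun h => absurd rfl h)
              push_cast at H
              exact H
            by_cases h5 : cur = [] ∧ ch = '\n'
            · simp only [if_pos h5]
              refine hnext cur ?_
              rw [hdropapp, List.dropWhile_append, ← hcur, h5.1]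
              simp [← hch, h5.2]
            · simp only [if_neg h5]
              refine hnext (cur ++ [ch]) ?_
              rw [hdropapp, List.dropWhile_append, ← hcur, ← hch]
              by_cases h6 : cur = []
              · have hchn : ¬ ch = '\n' := fun hn => h5 ⟨h6, hn⟩
                simp [h6, hchn]
              · simp [h6]
        · -- inside a brace block: both steps leave the state unchanged
          have hnB : ¬ (depth = 0 ∧ ch = ';') := fun h => h3 h.1
          simp only [pvStepA, pvStepB, if_neg h1, if_neg h2, if_neg h3, if_neg hnB]
          have H := ih (k+1) hdrop'.symm (by omega) decls cur depth start hd
            (fun h => absurd h h3) hinvne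
          push_cast at H
          exact H

-- ===== VERDICT (by name: the statement is the Claim_ definition above) =====
theorem extract_declarations_spec : Claim_equal_extract_declarations := by
  intro text _ _
  unfold Spec_extract_declarations extract_declarations extract_declarations_alt
  have h := pv_main text.toList text.toList 0 rfl (Nat.zero_le _) [] [] 0 0 le_rfl
      (by intro _; simp) (by intro h; exact absurd rfl h)
  simpa using h
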